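-- pv_equiv track=rewrite | github.com/Helly1206/xnas | opt/xnas/mounts/fstab.py | removeopt
-- ===== SOURCE A (Python) =====
-- def removeopt(options, tag):
--     hasopt = False
--
--     for opt in options:
--         if tag in opt:
--             hasopt = True
--             options.remove(opt)
--             break
--
--     return hasopt
-- ===== SOURCE B (Python) =====
-- def removeopt(options, tag):
--     result = []
--     found = False
--     for opt in options:
--         if not found and tag in opt:
--             found = True
--             continue
--         result.append(opt)
--     options[:] = result
--     return found
-- ===== Notes on version B (the rewrite author's own statement) =====
-- stated objective: alternative
-- what changed: B rebuilds the list in one pass with a found flag and slice-assigns it back, instead of A's scan-then-break plus a separate list.remove scan.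
import Mathlib
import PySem

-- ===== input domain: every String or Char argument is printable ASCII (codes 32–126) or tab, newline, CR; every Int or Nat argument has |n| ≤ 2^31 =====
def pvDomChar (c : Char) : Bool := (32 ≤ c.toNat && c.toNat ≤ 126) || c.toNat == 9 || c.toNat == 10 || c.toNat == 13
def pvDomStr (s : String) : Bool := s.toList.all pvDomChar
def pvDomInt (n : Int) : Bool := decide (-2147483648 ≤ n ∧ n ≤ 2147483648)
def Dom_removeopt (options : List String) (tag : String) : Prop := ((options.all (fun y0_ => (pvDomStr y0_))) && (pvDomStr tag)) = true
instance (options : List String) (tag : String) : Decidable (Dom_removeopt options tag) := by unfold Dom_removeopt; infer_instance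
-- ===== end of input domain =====

-- ===== PORT A =====
-- Loop: return True at the first option containing tag (A also removes it from the
-- list; the equivalence proved here is about the RETURN value only — B performs the
-- same mutation in Python via slice assignment).
def removeopt (options : List String) (tag : String) : Bool :=
  match options with
  | [] => false
  | opt :: rest => if PySem.Str.isIn tag opt then true else removeopt rest tag

-- ===== PORT B =====
-- B: single rebuild pass carrying (result, found); skip the first match, keep the rest.
def removeopt_alt_step (tag : String) (acc : List String × Bool) (opt : String) : List String × Bool :=
  if !acc.2 && PySem.Str.isIn tag opt then (acc.1, true) else (acc.1 ++ [opt], acc.2)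

def removeopt_alt (options : List String) (tag : String) : Bool :=
  (options.foldl (removeopt_alt_step tag) ([], false)).2

-- ===== PRECONDITION & SPEC =====
def Spec_removeopt (options : List String) (tag : String) (out : Bool) : Prop := out = removeopt_alt options tag
instance (options : List String) (tag : String) (out : Bool) : Decidable (Spec_removeopt options tag out) := by unfold Spec_removeopt; infer_instance

-- ===== CLAIM (what is proved, stated in full; the proofs are below) =====
def Claim_equal_removeopt : Prop := ∀ (options : List String) (tag : String), Dom_removeopt options tag → Spec_removeopt options tag (removeopt options tag)

-- ===== LEMMAS AND PROOFS =====

-- ===== VERDICT (by name: the statement is the Claim_ definition above) =====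
theorem alt_snd_true (tag : String) (l : List String) (res : List String) :
    (l.foldl (removeopt_alt_step tag) (res, true)).2 = true := by
  induction l generalizing res with
  | nil => rfl
  | cons o rest ih => simp [removeopt_alt_step, ih]

theorem alt_snd_false (tag : String) (l : List String) (res : List String) :
    (l.foldl (removeopt_alt_step tag) (res, false)).2 = removeopt l tag := by
  induction l generalizing res with
  | nil => rfl
  | cons o rest ih =>
    by_cases h : PySem.Chars.isIn tag.toList o.toList = true
    · simp [removeopt_alt_step, removeopt, PySem.Str.isIn, h, alt_snd_true]
    · simp [removeopt_alt_step, removeopt, PySem.Str.isIn, h, ih]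

theorem removeopt_spec : Claim_equal_removeopt := by
  intro options tag _
  unfold Spec_removeopt removeopt_alt
  rw [alt_snd_false]
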